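-- pv_equiv track=rewrite | github.com/huan186/LeetCode | 1301-number-of-paths-with-max-score/1301-number-of-paths-with-max-score.py | pathsWithMaxScore
-- ===== SOURCE A (Python) =====
-- from typing import List
--
-- def pathsWithMaxScore(board: List[str]) -> List[int]:
--     mod = 10 ** 9 + 7
--     n = len(board)
--     dp = [[0, 0] for _ in range(n)]  # [max_sum, ways]
--     dp[0] = [0, 1]
--     board[0] = '0' + board[0][1:]
--     board[-1] = board[-1][:-1] + '0'
--     for j in range(1, n):
--         if board[0][j] != 'X':
--             dp[j][0], dp[j][1] = dp[j - 1][0] + int(board[0][j]), dp[j - 1][1]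
--     for i in range(1, n):
--         nxt = [[0, 0] for _ in range(n)]
--         for j in range(n):
--             if board[i][j] != 'X':
--                 if board[i - 1][j] != 'X':
--                     nxt[j][0], nxt[j][1] = dp[j][0] + int(board[i][j]), dp[j][1]
--                 if j == 0:
--                     continue
--                 for s, w in (nxt[j - 1], dp[j - 1]):
--                     if w == 0:
--                         continue
--                     ns = s + int(board[i][j])
--                     if ns == nxt[j][0]:
--                         nxt[j][1] = (nxt[j][1] + w) % mod
--                     elif ns > nxt[j][0]:
--                         nxt[j][0] = ns
--                         nxt[j][1] = w
--         dp = nxt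
--     return dp[-1]
-- ===== SOURCE B (Python) =====
-- from typing import List
--
-- def pathsWithMaxScore(board: List[str]) -> List[int]:
--     # Top-down memoized recursion over the grid (demand-driven: cells cut off by
--     # 'X' are never evaluated), instead of A's bottom-up rolling row arrays.
--     # Same in-place board edits as A (observable by the caller).
--     mod = 10 ** 9 + 7
--     n = len(board)
--     board[0] = '0' + board[0][1:]
--     board[-1] = board[-1][:-1] + '0'
--     memo = {}
--
--     def f(i, j):
--         if (i, j) in memo:
--             return memo[(i, j)]
--         c = board[i][j]
--         if c == 'X':
--             r = (0, 0)
--         else: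
--             d = int(c)
--             if i == 0 and j == 0:
--                 r = (0, 1)
--             elif i == 0:
--                 s, w = f(0, j - 1)
--                 r = (s + d, w)
--             else:
--                 if board[i - 1][j] != 'X':
--                     s, w = f(i - 1, j)
--                     best, ways = s + d, w
--                 else:
--                     best, ways = 0, 0
--                 if j > 0:
--                     for s, w in (f(i, j - 1), f(i - 1, j - 1)):
--                         if w == 0:
--                             continue
--                         ns = s + d
--                         if ns == best:
--                             ways = (ways + w) % mod
--                         elif ns > best:
--                             best, ways = ns, w
--                 r = (best, ways)
--         memo[(i, j)] = r
--         return r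
--
--     s, w = f(n - 1, n - 1)
--     return [s, w]
-- ===== Notes on version B (the rewrite author's own statement) =====
-- stated objective: alternative
-- what changed: Replaces A's bottom-up sweep with rolling row arrays by a top-down memoized recursion f(i,j) that evaluates cells on demand from (n-1,n-1), never touching cells cut off behind 'X' walls.
-- outside the precondition, e.g. on pathsWithMaxScore(['00X', 'XXX', 'X?0']): A returns [0, 0], B raises ValueError
import Mathlib
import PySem

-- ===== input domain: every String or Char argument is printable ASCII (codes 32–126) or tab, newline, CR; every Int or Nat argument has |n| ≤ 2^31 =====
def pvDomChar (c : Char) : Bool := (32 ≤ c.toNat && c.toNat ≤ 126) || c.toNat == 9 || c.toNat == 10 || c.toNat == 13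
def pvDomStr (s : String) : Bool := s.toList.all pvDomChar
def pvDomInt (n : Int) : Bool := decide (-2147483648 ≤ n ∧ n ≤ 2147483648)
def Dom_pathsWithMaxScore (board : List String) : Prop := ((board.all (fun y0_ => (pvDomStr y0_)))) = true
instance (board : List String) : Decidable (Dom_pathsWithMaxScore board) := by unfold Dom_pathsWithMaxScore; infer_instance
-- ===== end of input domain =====

-- B re-implements A as a top-down memoized recursion f(i, j) (ported as the pure
-- structural recursion pvF; the Python memo dict is a cache of pvF's values) instead of
-- A's in-place bottom-up rolling row arrays; both the Python A and the Python B mutate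
-- board[0]/board[-1] in place in the same way, and the equivalence proved here is about
-- the return value.

-- ===== PORT A =====
-- both Pythons contain the same two board-mutation lines; ported once:
-- board[0] = '0' + board[0][1:]; board[-1] = board[-1][:-1] + '0' (rows as char lists)
def pvMut (board : List String) : List (List Char) :=
  let rows := board.map String.toList
  let rows1 := PySem.List.pySetD rows 0
    ('0' :: PySem.List.slice (PySem.List.pyGetD rows 0 []) (some 1) none)
  PySem.List.pySetD rows1 (-1)
    (PySem.List.slice (PySem.List.pyGetD rows1 (-1) []) none (some (-1)) ++ ['0'])

-- board[i][j] (total form; Pre_ keeps the reached indices in range)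
def pvC (rows : List (List Char)) (i j : Int) : Char :=
  PySem.List.pyGetD (PySem.List.pyGetD rows i []) j ' '

-- int(board[i][j]) on the single character (total form; Pre_ keeps it a digit)
def pvInt (c : Char) : Int := (PySem.Int.ofChars? [c]).getD 0

-- the body of A's first loop (over j in range(1, n))
def pvA_body0 (rows : List (List Char)) (dp : List (Int × Int)) (j : Int) : List (Int × Int) :=
  if pvC rows 0 j ≠ 'X' then
    PySem.List.pySetD dp j
      ((PySem.List.pyGetD dp (j - 1) (0, 0)).1 + pvInt (pvC rows 0 j),
       (PySem.List.pyGetD dp (j - 1) (0, 0)).2)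
  else dp

-- the body of A's candidate loop 'for s, w in (nxt[j - 1], dp[j - 1])'
def pvA_cand (md d j : Int) (nxt : List (Int × Int)) (sw : Int × Int) : List (Int × Int) :=
  if sw.2 = 0 then nxt
  else if sw.1 + d = (PySem.List.pyGetD nxt j (0, 0)).1 then
    PySem.List.pySetD nxt j
      ((PySem.List.pyGetD nxt j (0, 0)).1,
       PySem.Int.mod ((PySem.List.pyGetD nxt j (0, 0)).2 + sw.2) md)
  else if sw.1 + d > (PySem.List.pyGetD nxt j (0, 0)).1 then PySem.List.pySetD nxt j (sw.1 + d, sw.2)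
  else nxt

-- the tail of A's inner-loop body after the top-neighbour update ('continue' or candidates)
def pvA_tail (md : Int) (dp : List (Int × Int)) (d j : Int) (nxt : List (Int × Int)) : List (Int × Int) :=
  if j = 0 then nxt
  else
    [PySem.List.pyGetD nxt (j - 1) (0, 0), PySem.List.pyGetD dp (j - 1) (0, 0)].foldl
      (pvA_cand md d j) nxt

-- the body of A's inner loop (over j in range(n)), for row i with previous row dp
def pvA_bodyRow (md : Int) (rows : List (List Char)) (dp : List (Int × Int)) (i : Int)
    (nxt : List (Int × Int)) (j : Int) : List (Int × Int) :=
  if pvC rows i j ≠ 'X' then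
    pvA_tail md dp (pvInt (pvC rows i j)) j
      (if pvC rows (i - 1) j ≠ 'X' then
        PySem.List.pySetD nxt j
          ((PySem.List.pyGetD dp j (0, 0)).1 + pvInt (pvC rows i j),
           (PySem.List.pyGetD dp j (0, 0)).2)
      else nxt)
  else nxt

def pathsWithMaxScore (board : List String) : List Int :=
  let md : Int := 10 ^ 9 + 7
  let n : Nat := board.length
  let dp : List (Int × Int) := (List.range n).map (fun _ => ((0 : Int), (0 : Int)))
  let dp := dp.set 0 (0, 1)
  let rows := pvMut board
  let dp := (PySem.List.pyRange 1 (n : Int) 1).foldl (pvA_body0 rows) dp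
  let dp := (PySem.List.pyRange 1 (n : Int) 1).foldl (fun dp i =>
      (PySem.List.pyRange 0 (n : Int) 1).foldl (pvA_bodyRow md rows dp i)
        ((List.range n).map (fun _ => ((0 : Int), (0 : Int))))) dp
  let p := PySem.List.pyGetD dp (-1) (0, 0)
  [p.1, p.2]

-- ===== PORT B =====
-- the body of Source B's candidate loop (best/ways update from one predecessor (s, w))
def pvStep (md d : Int) (bw sw : Int × Int) : Int × Int :=
  if sw.2 = 0 then bw
  else
    let ns := sw.1 + d
    if ns = bw.1 then (bw.1, PySem.Int.mod (bw.2 + sw.2) md)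
    else if ns > bw.1 then (ns, sw.2)
    else bw

-- Source B's recursive f(i, j); the Python memo dict only caches f's (pure) values, so the
-- port is the same recursion without the cache. f is only ever called with 0 ≤ i, j
-- (row 0 recurses left, column 0 only up), hence Nat arguments.
def pvF (rows : List (List Char)) : Nat → Nat → Int × Int
  | 0, 0 => if pvC rows 0 0 = 'X' then (0, 0) else (0, 1)
  | 0, j + 1 =>
      if pvC rows 0 ((j : Int) + 1) = 'X' then (0, 0)
      else
        let p := pvF rows 0 j
        (p.1 + pvInt (pvC rows 0 ((j : Int) + 1)), p.2)
  | i + 1, j =>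
      if pvC rows ((i : Int) + 1) (j : Int) = 'X' then (0, 0)
      else
        let d := pvInt (pvC rows ((i : Int) + 1) (j : Int))
        let bw := if pvC rows (i : Int) (j : Int) ≠ 'X' then
            ((pvF rows i j).1 + d, (pvF rows i j).2)
          else ((0 : Int), (0 : Int))
        match j with
        | 0 => bw
        | jj + 1 =>
            pvStep (10 ^ 9 + 7) d (pvStep (10 ^ 9 + 7) d bw (pvF rows (i + 1) jj)) (pvF rows i jj)
  termination_by i j => (i, j)

def pathsWithMaxScore_alt (board : List String) : List Int :=
  let n : Nat := board.length
  let rows := pvMut board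
  let p := pvF rows (n - 1) (n - 1)
  [p.1, p.2]

-- ===== PRECONDITION & SPEC =====
-- Pre_ excludes boards holding a character that is neither a digit nor 'X' in the n×n
-- grid (outside the two corner cells both programs overwrite): each program calls
-- int() on such a cell exactly when its own traversal demands the cell's value, so on
-- most of them one or both of A and B raise ValueError (or IndexError on short rows).
def Pre_pathsWithMaxScore (board : List String) : Prop :=
  board ≠ [] ∧ (board.length = 1 ∨
    ((∀ row ∈ board, board.length ≤ row.toList.length) ∧
     (∀ i < board.length, ∀ j < board.length, ¬(i = 0 ∧ j = 0) →
        ¬(i = board.length - 1 ∧ j + 1 = ((board.getD (board.length - 1) "").toList.length)) →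
        (((board.getD i "").toList.getD j ' ').isDigit ∨
         ((board.getD i "").toList.getD j ' ') = 'X'))))
instance (board : List String) : Decidable (Pre_pathsWithMaxScore board) := by
  unfold Pre_pathsWithMaxScore
  have : ∀ i, Decidable (∀ j < board.length, ¬(i = 0 ∧ j = 0) →
        ¬(i = board.length - 1 ∧ j + 1 = ((board.getD (board.length - 1) "").toList.length)) →
        (((board.getD i "").toList.getD j ' ').isDigit ∨
         ((board.getD i "").toList.getD j ' ') = 'X')) := by
    intro i; exact Nat.decidableBallLT _ _
  exact instDecidableAnd

def pvWitness_pathsWithMaxScore : List String := ["E23", "3X5", "14S"]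

def Spec_pathsWithMaxScore (board : List String) (out : List Int) : Prop := out = pathsWithMaxScore_alt board
instance (board : List String) (out : List Int) : Decidable (Spec_pathsWithMaxScore board out) := by unfold Spec_pathsWithMaxScore; infer_instance

-- ===== CLAIM (what is proved, stated in full; the proofs are below) =====
def Claim_equal_pathsWithMaxScore : Prop := ∀ (board : List String), Dom_pathsWithMaxScore board → Pre_pathsWithMaxScore board → Spec_pathsWithMaxScore board (pathsWithMaxScore board)

-- ===== LEMMAS AND PROOFS =====

theorem pvSet_map_range {α : Type} (n j : Nat) (f : Nat → α) (v : α) (_hj : j < n) :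
    ((List.range n).map f).set j v = (List.range n).map (fun k => if k = j then v else f k) := by
  apply List.ext_getElem <;> simp
  intro k hk
  by_cases h : k = j
  · simp [h]
  · simp [h, Ne.symm h]

theorem pvMap_congr {α : Type} (n : Nat) (f g : Nat → α) (h : ∀ k, k < n → f k = g k) :
    (List.range n).map f = (List.range n).map g := by
  apply List.map_congr_left
  intro k hk
  exact h k (List.mem_range.mp hk)

theorem pvSetD_zero_cons {α : Type} (x : α) (xs : List α) (v : α) :
    PySem.List.pySetD (x :: xs) 0 v = v :: xs := by
  rw [PySem.List.pySetD_of_nonneg (x :: xs) v (by norm_num : (0 : Int) ≤ 0)]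
  rfl

theorem pvSetD_neg_one {α : Type} (xs : List α) (v : α) (h : xs ≠ []) :
    PySem.List.pySetD xs (-1) v = xs.set (xs.length - 1) v := by
  unfold PySem.List.pySetD PySem.List.pySet? PySem.List.pyIdx?
  have h1 : ¬ (0 : Int) ≤ -1 := by norm_num
  have h2 : -(xs.length : Int) ≤ -1 := by
    have : 1 ≤ xs.length := List.length_pos_of_ne_nil h
    omega
  rw [if_neg h1, if_pos h2]
  simp

theorem pvC_zero_zero (board : List String) (h : board ≠ []) :
    pvC (pvMut board) 0 0 = '0' := by
  obtain ⟨s, bs, rfl⟩ : ∃ s bs, board = s :: bs := by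
    cases board with
    | nil => exact absurd rfl h
    | cons a l => exact ⟨a, l, rfl⟩
  unfold pvMut
  simp only [List.map_cons]
  rw [PySem.List.pyGetD_zero_cons, PySem.List.slice_from_one, pvSetD_zero_cons]
  cases bs with
  | nil =>
    simp only [List.map_nil]
    rw [show PySem.List.pyGetD [('0' :: s.toList.tail)] (-1) ([] : List Char)
          = '0' :: s.toList.tail from rfl,
        PySem.List.slice_to_neg_one,
        show ∀ v : List Char, PySem.List.pySetD [('0' :: s.toList.tail)] (-1) v = [v] from
          fun _ => rfl]
    cases ht : s.toList.tail with
    | nil => simp [pvC, PySem.List.pyGetD_zero_cons]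
    | cons a l => simp [pvC, List.dropLast_cons₂, PySem.List.pyGetD_zero_cons]
  | cons b bs' =>
    simp only [List.map_cons]
    rw [pvSetD_neg_one (('0' :: s.toList.tail) :: b.toList :: bs'.map String.toList) _ (by simp)]
    have hl : (('0' :: s.toList.tail) :: b.toList :: bs'.map String.toList).length - 1
        = bs'.length + 1 := by simp
    rw [hl]
    simp [pvC, PySem.List.pyGetD_zero_cons]

-- evaluating one candidate update of A on a row state known at position j
theorem pvCand_step (n j : Nat) (md d : Int) (cur : Int × Int) (g : Nat → Int × Int)
    (hj : j < n) (sw : Int × Int) :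
    pvA_cand md d (j : Int) ((List.range n).map (fun k => if k = j then cur else g k)) sw
    = (List.range n).map (fun k => if k = j then pvStep md d cur sw else g k) := by
  unfold pvA_cand
  by_cases h0 : sw.2 = 0
  · simp [h0, pvStep]
  · have hread : PySem.List.pyGetD
        ((List.range n).map (fun k => if k = j then cur else g k)) ((j : Nat) : Int)
        ((0 : Int), (0 : Int)) = cur := by
      simp only [PySem.List.pyGetD_natCast]
      rw [PySem.List.getD_map_range _ _ _ _ hj, if_pos rfl]
    rw [if_neg h0, hread]
    simp only [PySem.List.pySetD_natCast]
    by_cases h1 : sw.1 + d = cur.1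
    · rw [if_pos h1, pvSet_map_range _ _ _ _ hj]
      apply pvMap_congr
      intro k hk
      by_cases hkj : k = j
      · subst hkj; simp [h0, h1, pvStep]
      · simp [hkj]
    · rw [if_neg h1]
      by_cases h2 : sw.1 + d > cur.1
      · rw [if_pos h2, pvSet_map_range _ _ _ _ hj]
        apply pvMap_congr
        intro k hk
        by_cases hkj : k = j
        · subst hkj; simp [h0, h1, h2, pvStep]
        · simp [hkj]
      · rw [if_neg h2]
        apply pvMap_congr
        intro k hk
        by_cases hkj : k = j
        · subst hkj; simp [h0, h1, h2, pvStep]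
        · simp [hkj]

-- evaluating A's 'continue-or-candidates' tail at a column j = jj + 1
theorem pvA_tail_eval (md d : Int) (n jj : Nat) (hj : jj + 1 < n) (B : Int × Int)
    (g h : Nat → Int × Int) :
    pvA_tail md ((List.range n).map g) d ((jj + 1 : Nat) : Int)
      ((List.range n).map (fun k => if k = jj + 1 then B else h k))
    = (List.range n).map (fun k => if k = jj + 1 then
        pvStep md d (pvStep md d B (h jj)) (g jj) else h k) := by
  unfold pvA_tail
  rw [if_neg (by push_cast; omega : ¬ ((jj + 1 : Nat) : Int) = 0)]
  have e1 : (((jj + 1 : Nat) : Int) - 1) = ((jj : Nat) : Int) := by push_cast; ring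
  rw [e1]
  rw [show PySem.List.pyGetD
        ((List.range n).map (fun k => if k = jj + 1 then B else h k)) ((jj : Nat) : Int)
        ((0 : Int), (0 : Int)) = h jj from by
    simp only [PySem.List.pyGetD_natCast]
    rw [PySem.List.getD_map_range _ _ _ _ (by omega), if_neg (by omega)]]
  rw [show PySem.List.pyGetD ((List.range n).map g) ((jj : Nat) : Int)
        ((0 : Int), (0 : Int)) = g jj from by
    simp only [PySem.List.pyGetD_natCast]
    exact PySem.List.getD_map_range _ _ _ _ (by omega)]
  simp only [List.foldl_cons, List.foldl_nil]
  rw [pvCand_step n (jj + 1) md d B h hj (h jj),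
      pvCand_step n (jj + 1) md d (pvStep md d B (h jj)) h hj (g jj)]

-- A's first-row loop establishes row 0 of B's recursion pvF
theorem pvA_row0 (rows : List (List Char)) (n m : Nat) (h1 : 1 ≤ m) (hm : m ≤ n) :
    (PySem.List.pyRange 1 (m : Int) 1).foldl (pvA_body0 rows)
      ((List.range n).map (fun k => if k < 1 then pvF rows 0 k else (0, 0)))
    = (List.range n).map (fun k => if k < m then pvF rows 0 k else (0, 0)) := by
  induction m, h1 using Nat.le_induction with
  | base =>
    rw [show ((1 : Nat) : Int) = 1 by norm_num,
        PySem.List.pyRange_one_eq_nil (a := 1) (b := 1) (by norm_num)]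
    simp
  | succ m hm1 ih =>
    have hmn : m < n := by omega
    rw [show (((m + 1 : Nat)) : Int) = (m : Int) + 1 by push_cast; ring,
        PySem.List.pyRange_one_succ_right (by exact_mod_cast hm1),
        List.foldl_append, ih (by omega)]
    simp only [List.foldl_cons, List.foldl_nil]
    obtain ⟨mm, rfl⟩ : ∃ mm, m = mm + 1 := ⟨m - 1, by omega⟩
    unfold pvA_body0
    by_cases hx : pvC rows 0 ((mm + 1 : Nat) : Int) = 'X'
    · rw [if_neg (not_not_intro hx)]
      apply pvMap_congr
      intro k hk
      rcases Nat.lt_trichotomy k (mm + 1) with h | h | h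
      · simp [h, Nat.lt_succ_of_lt h]
      · subst h
        have hg : pvF rows 0 (mm + 1) = (0, 0) := by
          rw [pvF.eq_2, if_pos (by push_cast at hx ⊢; exact hx)]
        simp [hg]
      · have h1 : ¬ k < mm + 1 := by omega
        have h2 : ¬ k < mm + 1 + 1 := by omega
        simp [h1, h2]
    · rw [if_pos hx]
      have e1 : (((mm + 1 : Nat) : Int) - 1) = ((mm : Nat) : Int) := by push_cast; ring
      rw [e1]
      simp only [PySem.List.pyGetD_natCast, PySem.List.pySetD_natCast]
      rw [PySem.List.getD_map_range _ _ _ _ (show mm < n by omega)]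
      rw [if_pos (by omega : mm < mm + 1), pvSet_map_range _ _ _ _ hmn]
      apply pvMap_congr
      intro k hk
      rcases Nat.lt_trichotomy k (mm + 1) with h | h | h
      · have h1 : ¬ k = mm + 1 := by omega
        have h2 : k < mm + 1 + 1 := by omega
        simp [h, h1, h2]
      · subst h
        have hg : pvF rows 0 (mm + 1) =
            ((pvF rows 0 mm).1 + pvInt (pvC rows 0 ((mm : Int) + 1)), (pvF rows 0 mm).2) := by
          rw [pvF.eq_2, if_neg (by push_cast at hx ⊢; exact hx)]
        have e2 : ((mm : Int) + 1) = (((mm + 1 : Nat)) : Int) := by push_cast; ring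
        rw [if_pos rfl, if_pos (by omega : mm + 1 < mm + 1 + 1), hg, e2]
      · have h1 : ¬ k = mm + 1 := by omega
        have h2 : ¬ k < mm + 1 := by omega
        have h3 : ¬ k < mm + 1 + 1 := by omega
        simp [h1, h2, h3]

-- one cell of A's inner row loop
theorem pvA_cellRow (rows : List (List Char)) (n i j : Nat) (hi : 1 ≤ i) (hj : j < n) :
    pvA_bodyRow (10 ^ 9 + 7) rows ((List.range n).map (fun k => pvF rows (i - 1) k)) (i : Int)
      ((List.range n).map (fun k => if k < j then pvF rows i k else (0, 0))) (j : Int)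
    = (List.range n).map (fun k => if k < j + 1 then pvF rows i k else (0, 0)) := by
  obtain ⟨ii, rfl⟩ : ∃ ii, i = ii + 1 := ⟨i - 1, by omega⟩
  simp only [Nat.add_sub_cancel]
  unfold pvA_bodyRow
  by_cases hx : pvC rows ((ii + 1 : Nat) : Int) ((j : Nat) : Int) = 'X'
  · rw [if_neg (not_not_intro hx)]
    apply pvMap_congr
    intro k hk
    rcases Nat.lt_trichotomy k j with h | h | h
    · simp [h, Nat.lt_succ_of_lt h]
    · subst h
      have hg : pvF rows (ii + 1) k = (0, 0) := by
        rw [pvF.eq_3, if_pos (by push_cast at hx ⊢; exact hx)]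
      simp [hg]
    · have h1 : ¬ k < j := by omega
      have h2 : ¬ k < j + 1 := by omega
      simp [h1, h2]
  · rw [if_pos hx]
    have etop : (((ii + 1 : Nat) : Int) - 1) = ((ii : Nat) : Int) := by push_cast; ring
    rw [etop]
    have hstate : (if pvC rows ((ii : Nat) : Int) ((j : Nat) : Int) ≠ 'X'
          then PySem.List.pySetD
                ((List.range n).map (fun k => if k < j then pvF rows (ii + 1) k else (0, 0)))
                ((j : Nat) : Int)
                ((PySem.List.pyGetD ((List.range n).map (fun k => pvF rows ii k))
                    ((j : Nat) : Int) (0, 0)).1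
                  + pvInt (pvC rows ((ii + 1 : Nat) : Int) ((j : Nat) : Int)),
                 (PySem.List.pyGetD ((List.range n).map (fun k => pvF rows ii k))
                    ((j : Nat) : Int) (0, 0)).2)
          else (List.range n).map (fun k => if k < j then pvF rows (ii + 1) k else (0, 0)))
        = (List.range n).map (fun k => if k = j then
            (if pvC rows ((ii : Nat) : Int) ((j : Nat) : Int) ≠ 'X'
              then ((pvF rows ii j).1 + pvInt (pvC rows ((ii + 1 : Nat) : Int) ((j : Nat) : Int)),
                    (pvF rows ii j).2)
              else (0, 0))
            else if k < j then pvF rows (ii + 1) k else (0, 0)) := by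
      by_cases ht : pvC rows ((ii : Nat) : Int) ((j : Nat) : Int) = 'X'
      · simp only [ht, ne_eq, not_true_eq_false, if_false]
        apply pvMap_congr
        intro k hk
        by_cases hkj : k = j
        · subst hkj; simp
        · simp [hkj]
      · simp only [ne_eq, ht, not_false_eq_true, if_true]
        rw [show PySem.List.pyGetD ((List.range n).map (fun k => pvF rows ii k))
              ((j : Nat) : Int) ((0 : Int), (0 : Int)) = pvF rows ii j from by
          simp only [PySem.List.pyGetD_natCast]
          exact PySem.List.getD_map_range _ _ _ _ hj]
        rw [PySem.List.pySetD_natCast, pvSet_map_range _ _ _ _ hj]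
    rw [hstate]
    cases j with
    | zero =>
      unfold pvA_tail
      rw [if_pos (by norm_num)]
      apply pvMap_congr
      intro k hk
      by_cases hkj : k = 0
      · subst hkj
        have hg : pvF rows (ii + 1) 0 =
            (if pvC rows ((ii : Nat) : Int) ((0 : Nat) : Int) ≠ 'X'
              then ((pvF rows ii 0).1 + pvInt (pvC rows ((ii + 1 : Nat) : Int) ((0 : Nat) : Int)),
                    (pvF rows ii 0).2)
              else (0, 0)) := by
          rw [pvF.eq_3, if_neg (by push_cast at hx ⊢; exact hx)]
          push_cast
          rfl
        simp only [Nat.lt_succ_self, if_true]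
        rw [hg]
      · simp [hkj]
    | succ jj =>
      rw [pvA_tail_eval (10 ^ 9 + 7) (pvInt (pvC rows ((ii + 1 : Nat) : Int) ((jj + 1 : Nat) : Int)))
            n jj hj _ _ _]
      apply pvMap_congr
      intro k hk
      rcases Nat.lt_trichotomy k (jj + 1) with h | h | h
      · have h1 : ¬ k = jj + 1 := by omega
        have h2 : k < jj + 1 + 1 := by omega
        simp [h1, h, h2]
      · subst h
        simp only [Nat.lt_succ_self, if_true]
        have hg : pvF rows (ii + 1) (jj + 1) =
            pvStep (10 ^ 9 + 7) (pvInt (pvC rows ((ii + 1 : Nat) : Int) ((jj + 1 : Nat) : Int)))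
              (pvStep (10 ^ 9 + 7) (pvInt (pvC rows ((ii + 1 : Nat) : Int) ((jj + 1 : Nat) : Int)))
                (if pvC rows ((ii : Nat) : Int) ((jj + 1 : Nat) : Int) ≠ 'X'
                  then ((pvF rows ii (jj + 1)).1
                      + pvInt (pvC rows ((ii + 1 : Nat) : Int) ((jj + 1 : Nat) : Int)),
                        (pvF rows ii (jj + 1)).2)
                  else (0, 0))
                (if jj < jj + 1 then pvF rows (ii + 1) jj else (0, 0)))
              (pvF rows ii jj) := by
          rw [pvF.eq_3, if_neg (by push_cast at hx ⊢; exact hx)]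
          rw [if_pos (by omega : jj < jj + 1)]
          push_cast
          rfl
        rw [hg]
        simp
      · have h1 : ¬ k = jj + 1 := by omega
        have h2 : ¬ k < jj + 1 := by omega
        have h3 : ¬ k < jj + 1 + 1 := by omega
        simp [h1, h2, h3]

-- A's inner row loop establishes row i of B's recursion
theorem pvA_rowStep (rows : List (List Char)) (n i m : Nat) (hi : 1 ≤ i) (hm : m ≤ n) :
    (PySem.List.pyRange 0 (m : Int) 1).foldl
      (pvA_bodyRow (10 ^ 9 + 7) rows ((List.range n).map (fun k => pvF rows (i - 1) k)) (i : Int))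
      ((List.range n).map (fun _ => ((0 : Int), (0 : Int))))
    = (List.range n).map (fun k => if k < m then pvF rows i k else (0, 0)) := by
  induction m with
  | zero => simp
  | succ m ih =>
    rw [show (((m + 1 : Nat)) : Int) = (m : Int) + 1 by push_cast; ring,
        PySem.List.pyRange_one_succ_right (by positivity),
        List.foldl_append, ih (by omega)]
    simp only [List.foldl_cons, List.foldl_nil]
    exact pvA_cellRow rows n i m hi (by omega)

-- A's outer loop establishes the rows of B's recursion one by one
theorem pvA_rows (rows : List (List Char)) (n : Nat) (m : Nat) (h1 : 1 ≤ m) (hm : m ≤ n) :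
    (PySem.List.pyRange 1 (m : Int) 1).foldl (fun dp i =>
      (PySem.List.pyRange 0 (n : Int) 1).foldl (pvA_bodyRow (10 ^ 9 + 7) rows dp i)
        ((List.range n).map (fun _ => ((0 : Int), (0 : Int)))))
      ((List.range n).map (fun k => pvF rows 0 k))
    = (List.range n).map (fun k => pvF rows (m - 1) k) := by
  induction m, h1 using Nat.le_induction with
  | base =>
    rw [show ((1 : Nat) : Int) = 1 by norm_num,
        PySem.List.pyRange_one_eq_nil (a := 1) (b := 1) (by norm_num)]
    rfl
  | succ m hm1 ih =>
    rw [show (((m + 1 : Nat)) : Int) = (m : Int) + 1 by push_cast; ring,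
        PySem.List.pyRange_one_succ_right (by exact_mod_cast hm1),
        List.foldl_append, ih (by omega)]
    simp only [List.foldl_cons, List.foldl_nil]
    rw [pvA_rowStep rows n m n hm1 le_rfl]
    simp only [Nat.add_sub_cancel]
    apply pvMap_congr
    intro k hk
    rw [if_pos hk]

-- A computes exactly the values of B's recursion, row by row
theorem pvA_eq (board : List String) (h : board ≠ []) :
    pathsWithMaxScore board =
      [(pvF (pvMut board) (board.length - 1) (board.length - 1)).1,
       (pvF (pvMut board) (board.length - 1) (board.length - 1)).2] := by
  have hn : 1 ≤ board.length := List.length_pos_of_ne_nil h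
  have h00 := pvC_zero_zero board h
  simp only [pathsWithMaxScore]
  have hinit : (((List.range board.length).map (fun _ => ((0 : Int), (0 : Int)))).set 0 (0, 1))
      = (List.range board.length).map
          (fun k => if k < 1 then pvF (pvMut board) 0 k else (0, 0)) := by
    rw [pvSet_map_range _ _ _ _ (by omega)]
    apply pvMap_congr
    intro k hk
    by_cases hk0 : k = 0
    · subst hk0
      rw [if_pos rfl, if_pos (show (0 : Nat) < 1 by omega), pvF.eq_1,
          if_neg (by rw [h00]; decide)]
    · rw [if_neg hk0, if_neg (by omega : ¬ k < 1)]
  rw [hinit, pvA_row0 (pvMut board) board.length board.length hn le_rfl]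
  have hrow0 : (List.range board.length).map
        (fun k => if k < board.length then pvF (pvMut board) 0 k else (0, 0))
      = (List.range board.length).map (fun k => pvF (pvMut board) 0 k) := by
    apply pvMap_congr
    intro k hk
    rw [if_pos hk]
  rw [hrow0, pvA_rows (pvMut board) board.length board.length hn le_rfl]
  have hne : (List.range board.length).map
      (fun k => pvF (pvMut board) (board.length - 1) k) ≠ [] := by
    have hlen : ((List.range board.length).map
        (fun k => pvF (pvMut board) (board.length - 1) k)).length = board.length := by simp
    intro hc
    rw [hc] at hlen
    simp at hlen
    omega
  rw [PySem.List.pyGetD_neg_one _ _ hne, List.getLast_eq_getElem]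
  simp

-- ===== VERDICT (by name: the statement is the Claim_ definition above) =====
theorem pathsWithMaxScore_spec : Claim_equal_pathsWithMaxScore := by
  intro board _ hpre
  unfold Spec_pathsWithMaxScore
  rw [pvA_eq board hpre.1]
  rfl
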